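-- pv_equiv track=rewrite | github.com/Henry-ZHR/OI-codes | 洛谷/P3798 辉夜姬的十道难题/5.py | calc
-- ===== SOURCE A (Python) =====
-- def judge(a: list[int]) -> bool:
--     for i in range(1, len(a)):
--         if a[i - 1] == a[i]:
--             return True
--
-- def calc(a: list[int]) -> int:
--     result = 0
--     while judge(a):
--         b = []
--         i = 0
--         while i < len(a):
--             if i < len(a) - 1 and a[i] == a[i + 1]:
--                 b.append(a[i] * 2)
--                 result += a[i] * 2
--                 i += 2
--             else:
--                 b.append(a[i])
--                 i += 1
--         a = b
--     return result
-- ===== SOURCE B (Python) =====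
-- def calc(a: list[int]) -> int:
--     # run-length encoding: list of [value, count]
--     runs = []
--     for x in a:
--         if runs and runs[-1][0] == x:
--             runs[-1][1] += 1
--         else:
--             runs.append([x, 1])
--     total = 0
--     while any(k > 1 for _, k in runs):
--         new = []
--         gain = 0
--         for v, k in runs:
--             q, r = divmod(k, 2)
--             if q:
--                 if new and new[-1][0] == 2 * v:
--                     new[-1][1] += q
--                 else:
--                     new.append([2 * v, q])
--                 gain += 2 * v * q
--             if r:
--                 if new and new[-1][0] == v:
--                     new[-1][1] += r
--                 else:
--                     new.append([v, r])
--         runs = new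
--         total += gain
--     return total
-- ===== Notes on version B (the rewrite author's own statement) =====
-- stated objective: alternative
-- what changed: B works on a run-length encoding of the list: each merge pass rewrites each run (v,k) to floor(k/2) copies of 2v plus k mod 2 copies of v in one sweep over the runs, instead of A's per-element scan with a separate judge() pre-scan per pass.
import Mathlib
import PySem

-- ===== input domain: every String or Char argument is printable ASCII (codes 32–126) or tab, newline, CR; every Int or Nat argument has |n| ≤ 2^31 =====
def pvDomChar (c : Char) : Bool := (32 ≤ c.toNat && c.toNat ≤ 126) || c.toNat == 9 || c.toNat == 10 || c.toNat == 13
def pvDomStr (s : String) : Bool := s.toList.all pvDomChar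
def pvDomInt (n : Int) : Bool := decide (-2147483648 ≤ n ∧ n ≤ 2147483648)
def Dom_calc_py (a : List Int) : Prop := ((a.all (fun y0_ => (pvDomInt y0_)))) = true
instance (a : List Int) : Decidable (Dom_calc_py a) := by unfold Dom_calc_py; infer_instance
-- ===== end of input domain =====

-- B replaces A's per-element merge passes by the same passes over a run-length encoding of the list; objective: alternative algorithm.

-- ===== PORT A =====
-- judge: scan for an adjacent equal pair
def judgeA : List Int → Bool
  | x :: y :: r => if x == y then true else judgeA (y :: r)
  | _ => false

-- one pass of A's inner while-i loop: builds b and the gain added to result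
def passA : List Int → List Int × Int
  | x :: y :: rest =>
      if x == y then (x * 2 :: (passA rest).1, (passA rest).2 + x * 2)
      else (x :: (passA (y :: rest)).1, (passA (y :: rest)).2)
  | [x] => ([x], 0)
  | [] => ([], 0)

-- termination fact for A's outer while loop
theorem passA_length (a : List Int) :
    (passA a).1.length ≤ a.length ∧ (judgeA a = true → (passA a).1.length < a.length) := by
  fun_induction passA a with
  | case1 x y rest hxy ih =>
      simp only [passA, judgeA, hxy, if_pos, List.length_cons]
      exact ⟨by omega, fun _ => by omega⟩
  | case2 x y rest hxy ih =>
      simp only [passA, judgeA, hxy, Bool.false_eq_true, if_false, List.length_cons] at ih ⊢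
      obtain ⟨h1, h2⟩ := ih
      refine ⟨by simpa using Nat.succ_le_succ h1, fun h => ?_⟩
      have := h2 (by simpa using h)
      simpa using Nat.succ_lt_succ this
  | case3 x => simp [judgeA]
  | case4 => simp [judgeA]

def calcGoA (a : List Int) (result : Int) : Int :=
  if h : judgeA a = true then
    calcGoA (passA a).1 (result + (passA a).2)
  else result
termination_by a.length
decreasing_by exact (passA_length a).2 h

def calc_py (a : List Int) : Int := calcGoA a 0

-- ===== PORT B =====
-- append a run (v,k) at the right end, merging with the last run when values agree
def pushRun : List (Int × Nat) → Int → Nat → List (Int × Nat)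
  | [], v, k => [(v, k)]
  | [(w, c)], v, k => if w == v then [(w, c + k)] else [(w, c), (v, k)]
  | r :: rs, v, k => r :: pushRun rs v k

def encodeRuns (a : List Int) : List (Int × Nat) :=
  a.foldl (fun rs x => pushRun rs x 1) []

-- one pass step over one run: (v,k) ↦ (2v, k/2) then (v, k%2), accumulating the gain
def stepRun (acc : List (Int × Nat) × Int) (vk : Int × Nat) : List (Int × Nat) × Int :=
  let q := vk.2 / 2
  let r := vk.2 % 2
  let acc1 := if q ≠ 0 then (pushRun acc.1 (2 * vk.1) q, acc.2 + 2 * vk.1 * (q : Int)) else acc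
  if r ≠ 0 then (pushRun acc1.1 vk.1 r, acc1.2) else acc1

def stepB (runs : List (Int × Nat)) : List (Int × Nat) × Int :=
  runs.foldl stepRun ([], 0)

def hasPair (runs : List (Int × Nat)) : Bool := runs.any (fun vk => 2 ≤ vk.2)

def countSum (runs : List (Int × Nat)) : Nat := (runs.map Prod.snd).sum

-- the next three lemmas are cited by calcGoB's decreasing_by, so they stay above it
theorem countSum_pushRun (rs : List (Int × Nat)) (v : Int) (k : Nat) :
    countSum (pushRun rs v k) = countSum rs + k := by
  fun_induction pushRun rs v k with
  | case1 => simp [countSum]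
  | case2 w c v k hw => simp [countSum]
  | case3 w c v k hw => simp [countSum]
  | case4 r rs v k h ih =>
      cases r with
      | mk w c => simp [countSum] at ih ⊢; omega

theorem stepRun_count (acc : List (Int × Nat) × Int) (v : Int) (k : Nat) :
    countSum (stepRun acc (v, k)).1 = countSum acc.1 + (k / 2 + k % 2) := by
  by_cases hq : k / 2 = 0 <;> by_cases hr : k % 2 = 0 <;>
    simp [stepRun, hq, hr, countSum_pushRun] <;> omega

theorem stepB_fold_count (runs : List (Int × Nat)) : ∀ acc : List (Int × Nat) × Int,
    countSum (List.foldl stepRun acc runs).1 ≤ countSum acc.1 + countSum runs ∧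
      (hasPair runs = true →
        countSum (List.foldl stepRun acc runs).1 < countSum acc.1 + countSum runs) := by
  induction runs with
  | nil => intro acc; simp [countSum, hasPair]
  | cons p rs ih =>
    intro acc
    obtain ⟨v, k⟩ := p
    obtain ⟨h1, h2⟩ := ih (stepRun acc (v, k))
    have hc := stepRun_count acc v k
    have hsum : countSum ((v, k) :: rs) = k + countSum rs := by simp [countSum]
    have hdiv : k / 2 + k % 2 ≤ k := by omega
    constructor
    · show countSum (List.foldl stepRun (stepRun acc (v, k)) rs).1 ≤ _
      omega
    · intro hp
      show countSum (List.foldl stepRun (stepRun acc (v, k)) rs).1 < _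
      simp [hasPair] at hp
      rcases hp with hk | ⟨a, b, hab, h2b⟩
      · have : k / 2 + k % 2 < k := by omega
        omega
      · have : hasPair rs = true := by
          simp [hasPair]
          exact ⟨a, b, hab, h2b⟩
        have := h2 this
        omega

-- termination fact for B's outer while loop
theorem stepB_count (runs : List (Int × Nat)) (h : hasPair runs = true) :
    countSum (stepB runs).1 < countSum runs := by
  have := (stepB_fold_count runs ([], 0)).2 h
  simpa [stepB, countSum] using this

def calcGoB (runs : List (Int × Nat)) (total : Int) : Int :=
  if h : hasPair runs = true then
    calcGoB (stepB runs).1 (total + (stepB runs).2)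
  else total
termination_by countSum runs
decreasing_by exact stepB_count runs h

def calc_py_alt (a : List Int) : Int := calcGoB (encodeRuns a) 0

-- ===== PRECONDITION & SPEC =====
def Spec_calc_py (a : List Int) (out : Int) : Prop := out = calc_py_alt a
instance (a : List Int) (out : Int) : Decidable (Spec_calc_py a out) := by unfold Spec_calc_py; infer_instance

-- ===== CLAIM (what is proved, stated in full; the proofs are below) =====
def Claim_equal_calc_py : Prop := ∀ (a : List Int), Dom_calc_py a → Spec_calc_py a (calc_py a)

-- ===== LEMMAS AND PROOFS =====

def decodeRuns : List (Int × Nat) → List Int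
  | [] => []
  | (v, k) :: rs => List.replicate k v ++ decodeRuns rs

-- well-formed runs: positive counts, adjacent values distinct
def WFRuns : List (Int × Nat) → Prop
  | [] => True
  | [p] => 1 ≤ p.2
  | p :: q :: rs => p.1 ≠ q.1 ∧ 1 ≤ p.2 ∧ WFRuns (q :: rs)

theorem decode_pushRun (rs : List (Int × Nat)) (v : Int) (k : Nat) :
    decodeRuns (pushRun rs v k) = decodeRuns rs ++ List.replicate k v := by
  fun_induction pushRun rs v k with
  | case1 => simp [decodeRuns]
  | case2 w c v k hw =>
      simp only [beq_iff_eq] at hw; subst hw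
      simp [decodeRuns, ← List.replicate_add]
  | case3 w c v k hw => simp [decodeRuns]
  | case4 r rs v k h ih =>
      cases r with
      | mk w c => simp [decodeRuns, ih]

theorem pushRun_head (r : Int × Nat) (rs : List (Int × Nat)) (v : Int) (k : Nat) :
    (pushRun (r :: rs) v k).head?.map Prod.fst = some r.1 := by
  obtain ⟨w, c⟩ := r
  cases rs with
  | nil => by_cases h : w == v <;> simp [pushRun, h]
  | cons q t => simp [pushRun]

theorem WFRuns_cons (p : Int × Nat) (l : List (Int × Nat)) (hl : WFRuns l) (hp : 1 ≤ p.2)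
    (hne : ∀ q ∈ l.head?.map Prod.fst, p.1 ≠ q) : WFRuns (p :: l) := by
  cases l with
  | nil => simpa [WFRuns]
  | cons q t => exact ⟨by simpa using hne q.1, hp, hl⟩

theorem WF_pushRun (rs : List (Int × Nat)) (v : Int) (k : Nat) (hw : WFRuns rs) (hk : 1 ≤ k) :
    WFRuns (pushRun rs v k) := by
  fun_induction pushRun rs v k with
  | case1 => simpa [WFRuns]
  | case2 w c v k h =>
      have hw' : 1 ≤ c := hw
      show 1 ≤ c + k
      omega
  | case3 w c v k h =>
      have hw' : 1 ≤ c := hw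
      exact ⟨by simpa using h, hw', hk⟩
  | case4 r rs v k h ih =>
      obtain ⟨w, c⟩ := r
      cases rs with
      | nil => exact absurd rfl (h w c rfl)
      | cons p rs2 =>
        obtain ⟨w2, c2⟩ := p
        have hw' : w ≠ w2 ∧ 1 ≤ c ∧ WFRuns ((w2, c2) :: rs2) := hw
        refine WFRuns_cons _ _ (ih hw'.2.2 hk) hw'.2.1 ?_
        rw [pushRun_head]
        simpa using hw'.1

theorem encode_aux (a : List Int) : ∀ rs : List (Int × Nat), WFRuns rs →
    decodeRuns (List.foldl (fun rs x => pushRun rs x 1) rs a) = decodeRuns rs ++ a ∧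
      WFRuns (List.foldl (fun rs x => pushRun rs x 1) rs a) := by
  induction a with
  | nil => intro rs h; simp [h]
  | cons x t ih =>
    intro rs h
    simp only [List.foldl_cons]
    obtain ⟨h1, h2⟩ := ih (pushRun rs x 1) (WF_pushRun rs x 1 h le_rfl)
    refine ⟨?_, h2⟩
    rw [h1, decode_pushRun]
    simp

theorem encode_ok (a : List Int) :
    decodeRuns (encodeRuns a) = a ∧ WFRuns (encodeRuns a) := by
  have := encode_aux a [] trivial
  simpa [encodeRuns, decodeRuns] using this

theorem WF_tail (p : Int × Nat) (rs : List (Int × Nat)) (h : WFRuns (p :: rs)) : WFRuns rs := by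
  cases rs with
  | nil => trivial
  | cons q t => exact (h : _ ∧ _ ∧ WFRuns (q :: t)).2.2

theorem WF_head_count (p : Int × Nat) (rs : List (Int × Nat)) (h : WFRuns (p :: rs)) : 1 ≤ p.2 := by
  cases rs with
  | nil => exact h
  | cons q t => exact (h : _ ∧ _ ∧ _).2.1

theorem decode_head (p : Int × Nat) (rs : List (Int × Nat)) (h : WFRuns (p :: rs)) :
    (decodeRuns (p :: rs)).head? = some p.1 := by
  obtain ⟨w, c⟩ := p
  have hc : 1 ≤ c := WF_head_count _ _ h
  match c, hc with
  | (m + 1), _ => simp [decodeRuns, List.replicate_succ]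

theorem decode_head_ne (v : Int) (rs : List (Int × Nat)) (hw : WFRuns rs)
    (hne : ∀ q ∈ rs.head?.map Prod.fst, v ≠ q) :
    ∀ y ∈ (decodeRuns rs).head?, y ≠ v := by
  cases rs with
  | nil => simp [decodeRuns]
  | cons p t =>
    rw [decode_head p t hw]
    intro y hy
    simp at hy
    subst hy
    exact fun hpv => (hne p.1 (by simp)) hpv.symm

theorem passA_replicate : ∀ (k : Nat) (v : Int) (rest : List Int),
    (∀ y ∈ rest.head?, y ≠ v) →
    passA (List.replicate k v ++ rest) =
      (List.replicate (k / 2) (2 * v) ++ List.replicate (k % 2) v ++ (passA rest).1,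
        2 * v * ((k / 2 : Nat) : Int) + (passA rest).2) := by
  intro k
  induction k using Nat.strong_induction_on with
  | _ k ih =>
    intro v rest h
    match k with
    | 0 => simp
    | 1 =>
      cases rest with
      | nil => simp [passA]
      | cons y t =>
        have hy : y ≠ v := by simpa using h
        simp [passA, show (v == y) = false by simpa using Ne.symm hy]
    | (k + 2) =>
      have hrep : List.replicate (k + 2) v ++ rest = v :: v :: (List.replicate k v ++ rest) := by
        simp [List.replicate_succ]
      rw [hrep]
      have := ih k (by omega) v rest h
      simp only [passA, beq_self_eq_true, if_pos, this]
      have h2 : (k + 2) / 2 = k / 2 + 1 := by omega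
      have h3 : (k + 2) % 2 = k % 2 := by omega
      rw [h2, h3]
      simp only [Prod.mk.injEq]
      constructor
      · simp [List.replicate_succ, mul_comm]
      · push_cast; ring

theorem judgeA_replicate (k : Nat) (v : Int) (rest : List Int) (hk : 1 ≤ k)
    (h : ∀ y ∈ rest.head?, y ≠ v) :
    judgeA (List.replicate k v ++ rest) = (decide (2 ≤ k) || judgeA rest) := by
  match k, hk with
  | 1, _ =>
    cases rest with
    | nil => simp [judgeA]
    | cons y t =>
      have hy : y ≠ v := by simpa using h
      simp [judgeA, show (v == y) = false by simpa using Ne.symm hy]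
  | (m + 2), _ =>
    have : List.replicate (m + 2) v ++ rest = v :: v :: (List.replicate m v ++ rest) := by
      simp [List.replicate_succ]
    rw [this]
    simp [judgeA]

theorem judge_hasPair (runs : List (Int × Nat)) (hw : WFRuns runs) :
    judgeA (decodeRuns runs) = hasPair runs := by
  induction runs with
  | nil => simp [decodeRuns, judgeA, hasPair]
  | cons p rs ih =>
    obtain ⟨v, k⟩ := p
    have htl := WF_tail _ _ hw
    have hhd : ∀ y ∈ (decodeRuns rs).head?, y ≠ v := by
      refine decode_head_ne v rs htl ?_
      cases rs with
      | nil => simp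
      | cons q t =>
        intro x hx
        simp at hx
        subst hx
        exact (hw : _ ∧ _ ∧ _).1
    show judgeA (List.replicate k v ++ decodeRuns rs) = _
    rw [judgeA_replicate k v _ (WF_head_count _ _ hw) hhd, ih htl]
    simp [hasPair]

theorem stepRun_decode (acc : List (Int × Nat) × Int) (v : Int) (k : Nat) :
    decodeRuns (stepRun acc (v, k)).1
        = decodeRuns acc.1 ++ List.replicate (k / 2) (2 * v) ++ List.replicate (k % 2) v ∧
      (stepRun acc (v, k)).2 = acc.2 + 2 * v * ((k / 2 : Nat) : Int) := by
  by_cases hq : k / 2 = 0 <;> by_cases hr : k % 2 = 0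
  · have hk : k = 0 := by omega
    subst hk
    simp [stepRun]
  · simp [stepRun, hq, hr, decode_pushRun]
  · simp [stepRun, hq, hr, decode_pushRun]
  · simp [stepRun, hq, hr, decode_pushRun]

theorem stepRun_WF (acc : List (Int × Nat) × Int) (vk : Int × Nat) (h : WFRuns acc.1) :
    WFRuns (stepRun acc vk).1 := by
  by_cases hq : vk.2 / 2 = 0 <;> by_cases hr : vk.2 % 2 = 0 <;>
    simp [stepRun, hq, hr] <;>
    first
    | exact WF_pushRun _ _ _ (WF_pushRun _ _ _ h (by omega)) (by omega)
    | exact WF_pushRun _ _ _ h (by omega)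
    | exact h

theorem stepB_fold (runs : List (Int × Nat)) : ∀ acc : List (Int × Nat) × Int, WFRuns runs →
    decodeRuns (List.foldl stepRun acc runs).1
        = decodeRuns acc.1 ++ (passA (decodeRuns runs)).1 ∧
      (List.foldl stepRun acc runs).2 = acc.2 + (passA (decodeRuns runs)).2 := by
  induction runs with
  | nil => intro acc _; simp [decodeRuns, passA]
  | cons p rs ih =>
    intro acc hw
    obtain ⟨v, k⟩ := p
    have htl := WF_tail _ _ hw
    have hhd : ∀ y ∈ (decodeRuns rs).head?, y ≠ v := by
      refine decode_head_ne v rs htl ?_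
      cases rs with
      | nil => simp
      | cons q t =>
        intro x hx
        simp at hx
        subst hx
        exact (hw : _ ∧ _ ∧ _).1
    have hrep := passA_replicate k v (decodeRuns rs) hhd
    have hstep := stepRun_decode acc v k
    obtain ⟨ih1, ih2⟩ := ih (stepRun acc (v, k)) htl
    constructor
    · show decodeRuns (List.foldl stepRun (stepRun acc (v, k)) rs).1 = _
      rw [ih1, hstep.1]
      show _ = decodeRuns acc.1 ++ (passA (List.replicate k v ++ decodeRuns rs)).1
      rw [hrep]
      simp
    · show (List.foldl stepRun (stepRun acc (v, k)) rs).2 = _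
      rw [ih2, hstep.2]
      show _ = acc.2 + (passA (List.replicate k v ++ decodeRuns rs)).2
      rw [hrep]
      ring

theorem stepB_decode (runs : List (Int × Nat)) (hw : WFRuns runs) :
    decodeRuns (stepB runs).1 = (passA (decodeRuns runs)).1 ∧
      (stepB runs).2 = (passA (decodeRuns runs)).2 := by
  have := stepB_fold runs ([], 0) hw
  simpa [stepB, decodeRuns] using this

theorem stepB_fold_WF (runs : List (Int × Nat)) : ∀ acc : List (Int × Nat) × Int,
    WFRuns acc.1 → WFRuns (List.foldl stepRun acc runs).1 := by
  induction runs with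
  | nil => intro acc h; exact h
  | cons p rs ih => intro acc h; exact ih _ (stepRun_WF acc p h)

theorem stepB_WF (runs : List (Int × Nat)) : WFRuns (stepB runs).1 :=
  stepB_fold_WF runs ([], 0) trivial

theorem mem_le_countSum (p : Int × Nat) (runs : List (Int × Nat)) (h : p ∈ runs) :
    p.2 ≤ countSum runs := by
  induction runs with
  | nil => simp at h
  | cons q rs ih =>
    simp only [countSum, List.map_cons, List.sum_cons] at *
    rcases List.mem_cons.mp h with h | h
    · subst h; omega
    · have := ih h; omega

theorem go_eq (n : Nat) : ∀ (runs : List (Int × Nat)) (total : Int),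
    countSum runs ≤ n → WFRuns runs →
    calcGoA (decodeRuns runs) total = calcGoB runs total := by
  induction n with
  | zero =>
    intro runs total hn hw
    have hp : hasPair runs = false := by
      cases h : hasPair runs with
      | false => rfl
      | true =>
        exfalso
        simp [hasPair] at h
        obtain ⟨a, b, hab, h2b⟩ := h
        have := mem_le_countSum (a, b) runs hab
        simp at this
        omega
    rw [calcGoA, calcGoB]
    rw [judge_hasPair runs hw, hp]
    simp
  | succ n ih =>
    intro runs total hn hw
    rw [calcGoA, calcGoB, judge_hasPair runs hw]
    cases hp : hasPair runs with
    | false => simp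
    | true =>
      simp only [dif_pos]
      obtain ⟨hd, hg⟩ := stepB_decode runs hw
      rw [← judge_hasPair runs hw] at hp
      rw [← hd, ← hg] at *
      have hcount : countSum (stepB runs).1 ≤ n := by
        have := stepB_count runs (by rwa [judge_hasPair runs hw] at hp)
        omega
      exact ih (stepB runs).1 (total + (stepB runs).2) hcount (stepB_WF runs)

-- ===== VERDICT (by name: the statement is the Claim_ definition above) =====
theorem calc_py_spec : Claim_equal_calc_py := by
  intro a _
  unfold Spec_calc_py calc_py calc_py_alt
  obtain ⟨hd, hw⟩ := encode_ok a
  rw [← go_eq (countSum (encodeRuns a)) _ 0 le_rfl hw, hd]
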